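-- pv_equiv track=rewrite | github.com/Chenghao-Tan/benchmark | method/roar/utils.py | infer_categorical_groups
-- ===== SOURCE A (Python) =====
-- from typing import Iterable
--
-- def infer_categorical_groups(feature_names: Iterable[str]) -> list[list[int]]:
--     groups: dict[str, list[int]] = {}
--     for index, feature_name in enumerate(feature_names):
--         if "_cat_" not in feature_name:
--             continue
--         prefix, _ = feature_name.rsplit("_cat_", 1)
--         groups.setdefault(prefix, []).append(index)
--     return [sorted(indices) for _, indices in sorted(groups.items())]
-- ===== SOURCE B (Python) =====
-- def infer_categorical_groups(feature_names):
--     pairs = [(name.rsplit("_cat_", 1)[0], index)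
--              for index, name in enumerate(feature_names)
--              if "_cat_" in name]
--     return [[index for prefix, index in pairs if prefix == key]
--             for key in sorted({prefix for prefix, _ in pairs})]
-- ===== Notes on version B (the rewrite author's own statement) =====
-- stated objective: simpler
-- what changed: Replaces the dict-accumulation (setdefault/append) plus items-sort with two comprehensions: build the (prefix, index) pair list once, then emit, for each key of the sorted prefix set, the indices picked out of that list by a direct scan.
import Mathlib
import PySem

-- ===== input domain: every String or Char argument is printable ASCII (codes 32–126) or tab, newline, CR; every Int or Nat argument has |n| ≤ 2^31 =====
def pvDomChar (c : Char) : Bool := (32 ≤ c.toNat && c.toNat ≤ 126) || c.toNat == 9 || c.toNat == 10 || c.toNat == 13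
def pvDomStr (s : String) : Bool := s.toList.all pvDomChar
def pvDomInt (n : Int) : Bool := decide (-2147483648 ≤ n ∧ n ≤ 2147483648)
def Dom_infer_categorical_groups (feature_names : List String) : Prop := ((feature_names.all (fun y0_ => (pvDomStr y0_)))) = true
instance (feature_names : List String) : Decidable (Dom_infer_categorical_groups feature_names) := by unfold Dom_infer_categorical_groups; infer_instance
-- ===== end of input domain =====

-- B replaces A's dict accumulation + items-sort with a pair list scanned once per sorted distinct prefix (objective: simpler).

-- ===== PORT A =====
def infer_categorical_groups (feature_names : List String) : List (List Int) :=
  let groups : PySem.Dict String (List Int) :=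
    (PySem.List.enumerate feature_names).foldl
      (fun g p =>
        if PySem.Str.isIn "_cat_" p.2 then
          -- prefix, _ = feature_name.rsplit("_cat_", 1): PySem has no rsplit, but here "_cat_" occurs
          -- in the string, so rsplit("_cat_", 1)[0] is exactly the slice up to the last occurrence
          g.modify (PySem.Str.slice p.2 none (some (PySem.Str.rfind p.2 "_cat_"))) []
            (fun l => l ++ [p.1])                -- groups.setdefault(prefix, []).append(index)
        else g)
      PySem.Dict.empty
  -- sorted(groups.items()) compares (key, value) tuples; dict keys are distinct, so this is
  -- exactly the sort by the key component (exact here)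
  (PySem.List.sorted groups.items (fun kv => kv.1)).map
    (fun kv => PySem.List.sorted kv.2 (fun i => i))

-- ===== PORT B =====
def infer_categorical_groups_alt (feature_names : List String) : List (List Int) :=
  let pairs : List (String × Int) :=
    ((PySem.List.enumerate feature_names).filter
        (fun p => PySem.Str.isIn "_cat_" p.2)).map
      (fun p => (PySem.Str.slice p.2 none (some (PySem.Str.rfind p.2 "_cat_")), p.1))
  -- sorted({prefix for prefix, _ in pairs}): the set's iteration order is irrelevant under sorted,
  -- so the distinct prefixes (PySem.Set.ofList) sorted by themselves are exact
  (PySem.List.sorted (PySem.Set.ofList (pairs.map (fun q => q.1))) (fun k => k)).map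
    (fun k => (pairs.filter (fun q => q.1 == k)).map (fun q => q.2))

-- ===== PRECONDITION & SPEC =====
def Spec_infer_categorical_groups (feature_names : List String) (out : List (List Int)) : Prop := out = infer_categorical_groups_alt feature_names
instance (feature_names : List String) (out : List (List Int)) : Decidable (Spec_infer_categorical_groups feature_names out) := by unfold Spec_infer_categorical_groups; infer_instance

-- ===== CLAIM (what is proved, stated in full; the proofs are below) =====
def Claim_equal_infer_categorical_groups : Prop := ∀ (feature_names : List String), Dom_infer_categorical_groups feature_names → Spec_infer_categorical_groups feature_names (infer_categorical_groups feature_names)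

-- ===== LEMMAS AND PROOFS =====

-- The (prefix, index) pairs both programs work from, in index order.
def pvP (feature_names : List String) : List (String × Int) :=
  ((PySem.List.enumerate feature_names).filter
      (fun p => PySem.Str.isIn "_cat_" p.2)).map
    (fun p => (PySem.Str.slice p.2 none (some (PySem.Str.rfind p.2 "_cat_")), p.1))

-- A's accumulation loop is the canonical modify-append fold over the pair list.
theorem pvGroups_eq (feature_names : List String) :
    (PySem.List.enumerate feature_names).foldl
      (fun (g : PySem.Dict String (List Int)) p =>
        if PySem.Str.isIn "_cat_" p.2 then
          g.modify (PySem.Str.slice p.2 none (some (PySem.Str.rfind p.2 "_cat_"))) []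
            (fun l => l ++ [p.1])
        else g)
      PySem.Dict.empty
    = (pvP feature_names).foldl (fun d q => d.modify q.1 [] (fun l => l ++ [q.2])) PySem.Dict.empty := by
  rw [pvP, List.foldl_map, List.foldl_filter]

-- The snd components of any sublist of the pair list are strictly increasing (enumerate indices).
theorem pvP_snd_pairwise (feature_names : List String) {l : List (String × Int)}
    (h : l.Sublist (pvP feature_names)) :
    List.Pairwise (fun a b : Int => a < b) (l.map (fun q => q.2)) := by
  have hp : List.Pairwise (fun a b : String × Int => a.2 < b.2) (pvP feature_names) := by
    rw [pvP]
    rw [List.pairwise_map]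
    exact ((PySem.List.pairwise_lt_enumerate feature_names 0).sublist
      List.filter_sublist).imp (fun {a b} hab => hab)
  exact (List.pairwise_map).2 ((hp.sublist h).imp (fun {a b} hab => hab))

-- a strictly increasing list of ints is its own sort
theorem pvSorted_self {l : List Int} (h : List.Pairwise (fun a b : Int => a < b) l) :
    PySem.List.sorted l (fun i => i) = l :=
  PySem.List.sorted_eq_of_perm_of_pairwise_lt l l _ (List.Perm.refl l) h

theorem infer_categorical_groups_eq (feature_names : List String) :
    infer_categorical_groups feature_names = infer_categorical_groups_alt feature_names := by
  unfold infer_categorical_groups infer_categorical_groups_alt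
  dsimp only
  rw [pvGroups_eq feature_names]
  set P := pvP feature_names with hP
  set D := P.foldl (fun d q => d.modify q.1 [] (fun l => l ++ [q.2])) PySem.Dict.empty with hD
  have hkeys : D.keys = PySem.Set.ofList (P.map (fun q => q.1)) := by
    rw [hD, PySem.Dict.keys_foldl_modify_key P (fun q => q.1) [] (fun d q => (fun l => l ++ [q.2]))]
    rfl
  have hnodup : D.keys.Nodup := by
    rw [hD]
    exact PySem.Dict.nodup_keys_foldl_modify_key P (fun q => q.1) [] _ _ (by simp [PySem.Dict.empty, PySem.Dict.keys])
  have hgetD : ∀ k, D.getD k [] = (P.filter (fun q => q.1 == k)).map (fun q => q.2) := by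
    intro k
    rw [hD, PySem.Dict.getD_foldl_modify_append P PySem.Dict.empty k]
    simp [PySem.Dict.empty, PySem.Dict.getD, PySem.Dict.get?]
  have hitems : D.items = D.keys.map (fun k => (k, D.getD k [])) :=
    PySem.Dict.items_eq_map_keys D hnodup []
  -- sorted(items) by key = sorted distinct keys, each paired with its value
  have hsortkeys : PySem.List.sorted D.items (fun kv => kv.1)
      = (PySem.List.sorted D.keys (fun k => k)).map (fun k => (k, D.getD k [])) := by
    apply PySem.List.sorted_eq_of_perm_of_pairwise_lt
    · rw [hitems]
      exact (PySem.List.sorted_perm D.keys (fun k => k) false).map _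
    · rw [List.pairwise_map]
      have hn : (PySem.List.sorted D.keys (fun k => k)).Nodup :=
        (PySem.List.sorted_perm D.keys (fun k => k) false).nodup_iff.2 hnodup
      have hle := PySem.List.sorted_pairwise D.keys (fun k => k)
      exact (hle.and hn).imp (fun {a b} hab => lt_of_le_of_ne hab.1 hab.2)
  rw [hsortkeys, List.map_map, hkeys]
  apply List.map_congr_left
  intro k _
  show PySem.List.sorted (D.getD k []) (fun i => i) = _
  rw [hgetD k]
  exact pvSorted_self (pvP_snd_pairwise feature_names List.filter_sublist)

-- ===== VERDICT (by name: the statement is the Claim_ definition above) =====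
theorem infer_categorical_groups_spec : Claim_equal_infer_categorical_groups := by
  intro feature_names _
  unfold Spec_infer_categorical_groups
  exact infer_categorical_groups_eq feature_names
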